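-- pv_equiv track=rewrite | github.com/sat0317/2023_TGwinG_FE_PJS | 4week_assignment.py | double
-- ===== SOURCE A (Python) =====
-- def double(lst):
--     data = tuple(sorted(lst))
--     cnt  = 0
--
--     for x in range(len(data)):
--         t = data[x]*2
--         for j in data[x+1:]:
--             if j==t:
--                 cnt+=1
--                 break
--             if j>t:
--                 break
--
--     return cnt
-- ===== SOURCE B (Python) =====
-- def double(lst):
--     seen = set()
--     cnt = 0
--     for v in reversed(sorted(lst)):
--         if 2 * v in seen:
--             cnt += 1
--         seen.add(v)
--     return cnt
-- ===== Notes on version B (the rewrite author's own statement) =====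
-- stated objective: faster
-- what changed: A scans the suffix of the sorted list for 2*x at every index (quadratic on duplicate-heavy input); B makes one reverse pass over the sorted list keeping a hash set of already-seen larger elements and tests 2*v membership in O(1).
import Mathlib
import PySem

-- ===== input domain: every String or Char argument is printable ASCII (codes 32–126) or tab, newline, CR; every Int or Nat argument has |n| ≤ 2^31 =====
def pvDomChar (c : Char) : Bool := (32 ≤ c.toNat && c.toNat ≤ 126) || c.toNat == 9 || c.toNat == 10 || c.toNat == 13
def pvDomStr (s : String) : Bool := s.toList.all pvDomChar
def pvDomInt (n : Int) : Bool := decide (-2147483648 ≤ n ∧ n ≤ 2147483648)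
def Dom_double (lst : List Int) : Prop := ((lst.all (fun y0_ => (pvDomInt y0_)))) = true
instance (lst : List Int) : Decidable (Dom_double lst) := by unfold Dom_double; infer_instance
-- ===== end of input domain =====

-- B replaces A's quadratic per-element suffix scan by one reverse pass over the
-- sorted list with a set of already-seen (larger) elements; same return value.

-- ===== PORT A =====
-- inner loop 'for j in data[x+1:]: if j==t: cnt+=1; break; if j>t: break'
def doubleScan (t : Int) : List Int → Int
  | [] => 0
  | j :: rest => if j = t then 1 else if j > t then 0 else doubleScan t rest

def double (lst : List Int) : Int :=
  let data := PySem.List.sorted lst (fun x => x) false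
  (PySem.List.pyRange 0 (data.length : Int) 1).foldl
    (fun cnt x =>
      cnt + doubleScan (PySem.List.pyGetD data x 0 * 2)
              (PySem.List.slice data (some (x + 1)) none)) 0

-- ===== PORT B =====
def double_alt (lst : List Int) : Int :=
  ((PySem.List.sorted lst (fun x => x) false).reverse.foldl
    (fun (st : PySem.Set Int × Int) v =>
      (PySem.Set.add st.1 v, if PySem.Set.contains st.1 (2 * v) then st.2 + 1 else st.2))
    (PySem.Set.empty, 0)).2

-- ===== PRECONDITION & SPEC =====
def Spec_double (lst : List Int) (out : Int) : Prop := out = double_alt lst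
instance (lst : List Int) (out : Int) : Decidable (Spec_double lst out) := by unfold Spec_double; infer_instance

-- ===== CLAIM (what is proved, stated in full; the proofs are below) =====
def Claim_equal_double : Prop := ∀ (lst : List Int), Dom_double lst → Spec_double lst (double lst)

-- ===== LEMMAS AND PROOFS =====

-- count of positions whose double occurs strictly later in the list
def gCountSeen (seen : List Int) : List Int → Int
  | [] => 0
  | v :: rest => gCountSeen seen rest + (if 2 * v ∈ seen ∨ 2 * v ∈ rest then 1 else 0)

def gCount : List Int → Int
  | [] => 0
  | v :: rest => (if 2 * v ∈ rest then 1 else 0) + gCount rest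

-- A's inner scan on a sorted suffix is exactly a membership test
theorem doubleScan_sorted (t : Int) (s : List Int) (hs : s.Pairwise (· ≤ ·)) :
    doubleScan t s = if t ∈ s then 1 else 0 := by
  induction s with
  | nil => simp [doubleScan]
  | cons j rest ih =>
    rcases List.pairwise_cons.mp hs with ⟨hj, hrest⟩
    by_cases hjt : j = t
    · simp [doubleScan, hjt]
    · by_cases hgt : j > t
      · have hnot : t ∉ rest := fun hm => absurd (hj t hm) (by omega)
        simp only [doubleScan, if_neg hjt, if_pos hgt, List.mem_cons]
        have : ¬t = j := by omega
        simp [this, hnot]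
      · simp [doubleScan, hjt, hgt, ih hrest, List.mem_cons, Ne.symm hjt]

-- index-shift: A's sum over indices equals gCount (no sortedness needed here
-- beyond doubleScan having been rewritten to membership)
theorem sum_mem_eq_gCount (d : List Int) :
    ((List.range d.length).map
      (fun k => if 2 * d.getD k 0 ∈ d.drop (k + 1) then (1 : Int) else 0)).sum
      = gCount d := by
  induction d with
  | nil => simp [gCount]
  | cons v rest ih =>
    rw [List.length_cons, List.range_succ_eq_map]
    simp only [List.map_cons, List.map_map, List.sum_cons]
    have : ((List.range rest.length).map
        ((fun k => if 2 * (v :: rest).getD k 0 ∈ (v :: rest).drop (k + 1) then (1 : Int) else 0)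
          ∘ (fun k => k + 1))).sum
        = ((List.range rest.length).map
            (fun k => if 2 * rest.getD k 0 ∈ rest.drop (k + 1) then (1 : Int) else 0)).sum := by
      apply congrArg
      apply List.map_congr_left
      intro k _
      simp [Function.comp, List.drop_succ_cons]
    rw [this, ih]
    simp [gCount]

-- A equals gCount of the sorted list
theorem double_eq_gCount (lst : List Int) :
    double lst = gCount (PySem.List.sorted lst (fun x => x) false) := by
  unfold double
  set d := PySem.List.sorted lst (fun x => x) false with hd
  have hsorted : d.Pairwise (· ≤ ·) := PySem.List.sorted_pairwise lst (fun x => x)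
  have hstep : ∀ (k : Nat),
      doubleScan (PySem.List.pyGetD d (k : Int) 0 * 2)
          (PySem.List.slice d (some ((k : Int) + 1)) none)
        = if 2 * d.getD k 0 ∈ d.drop (k + 1) then (1 : Int) else 0 := by
    intro k
    have h1 : PySem.List.pyGetD d (k : Int) 0 = d.getD k 0 := by
      simp [PySem.List.pyGetD_natCast]
    have h2 : PySem.List.slice d (some ((k : Int) + 1)) none = d.drop (k + 1) := by
      have : ((k : Int) + 1) = ((k + 1 : Nat) : Int) := by push_cast; ring
      rw [this, PySem.List.slice_from_natCast]
    rw [h1, h2, doubleScan_sorted _ _ hsorted.drop, mul_comm]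
  dsimp only
  rw [PySem.List.pyRange_one]
  have hlen : ((d.length : Int) - 0).toNat = d.length := by omega
  rw [hlen]
  simp only [zero_add]
  have hfold : ∀ (L : List Nat) (init : Int),
      (List.map (fun k : Nat => (k : Int)) L).foldl
        (fun cnt x =>
          cnt + doubleScan (PySem.List.pyGetD d x 0 * 2)
                  (PySem.List.slice d (some (x + 1)) none)) init
        = init + (L.map (fun k => if 2 * d.getD k 0 ∈ d.drop (k + 1) then (1 : Int) else 0)).sum := by
    intro L
    induction L with
    | nil => intro init; simp
    | cons k t iht =>
      intro init
      simp only [List.map_cons, List.foldl_cons, List.sum_cons]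
      rw [iht, hstep k]
      ring
  rw [hfold, sum_mem_eq_gCount]
  ring

-- B's reverse fold: invariant on the (seen, cnt) state
theorem alt_fold_invariant (d : List Int) :
    ∀ (seen : PySem.Set Int) (cnt : Int),
      (∀ x, x ∈ (d.reverse.foldl
          (fun (st : PySem.Set Int × Int) v =>
            (PySem.Set.add st.1 v,
             if PySem.Set.contains st.1 (2 * v) then st.2 + 1 else st.2))
          (seen, cnt)).1 ↔ x ∈ seen ∨ x ∈ d) ∧
      (d.reverse.foldl
          (fun (st : PySem.Set Int × Int) v =>
            (PySem.Set.add st.1 v,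
             if PySem.Set.contains st.1 (2 * v) then st.2 + 1 else st.2))
          (seen, cnt)).2
        = cnt + gCountSeen seen d := by
  induction d with
  | nil => intro seen cnt; exact ⟨by simp, by simp [gCountSeen]⟩
  | cons v rest ih =>
    intro seen cnt
    rw [List.reverse_cons, List.foldl_append]
    obtain ⟨hmem, hcnt⟩ := ih seen cnt
    set R := rest.reverse.foldl
        (fun (st : PySem.Set Int × Int) v =>
          (PySem.Set.add st.1 v,
           if PySem.Set.contains st.1 (2 * v) then st.2 + 1 else st.2))
        (seen, cnt) with hR
    simp only [List.foldl_cons, List.foldl_nil]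
    refine ⟨?_, ?_⟩
    · intro x
      rw [PySem.Set.mem_add, hmem x, List.mem_cons]
      tauto
    · have hc : PySem.Set.contains R.1 (2 * v) = true ↔ (2 * v ∈ seen ∨ 2 * v ∈ rest) := by
        rw [PySem.Set.contains_iff]; exact hmem (2 * v)
      by_cases h : 2 * v ∈ seen ∨ 2 * v ∈ rest
      · rw [if_pos (hc.mpr h), hcnt]
        simp only [gCountSeen, if_pos h]
        ring
      · rw [if_neg (fun hb => h (hc.mp hb)), hcnt]
        simp only [gCountSeen, if_neg h]
        ring

theorem gCountSeen_empty (d : List Int) : gCountSeen PySem.Set.empty d = gCount d := by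
  induction d with
  | nil => rfl
  | cons v rest ih =>
    simp only [gCountSeen, gCount, ih]
    have h : (2 * v ∈ PySem.Set.empty ∨ 2 * v ∈ rest) ↔ 2 * v ∈ rest := by
      simp [PySem.Set.empty]
    rw [if_congr h rfl rfl]
    ring

theorem double_alt_eq_gCount (lst : List Int) :
    double_alt lst = gCount (PySem.List.sorted lst (fun x => x) false) := by
  unfold double_alt
  obtain ⟨-, hcnt⟩ :=
    alt_fold_invariant (PySem.List.sorted lst (fun x => x) false)
      PySem.Set.empty 0
  rw [hcnt, gCountSeen_empty]
  ring

-- ===== VERDICT (by name: the statement is the Claim_ definition above) =====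
theorem double_spec : Claim_equal_double := by
  intro lst _
  unfold Spec_double
  rw [double_eq_gCount, double_alt_eq_gCount]
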